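-- pv_equiv track=rewrite | github.com/MOHAMMAD-KIMIA/Compiler | Compiler 1st phase (Lexical Analysis)/COM.py | dfaGreater
-- ===== SOURCE A (Python) =====
-- def dfaGreater(input_text):
--     state = 'A'
--     tokens = []
--     errors = []
--     position = 0
--
--     for ch in input_text:
--         position += 1
--         match state:
--             case 'A':
--                 if ch == '<':
--                     state = 'B'
--                 else:
--                     errors.append(f"")
--                     state = 'Z'
--             case 'B':
--                 if ch == '>':
--                     state = 'C'
--                 else:
--                     errors.append(f"")
--                     state = 'Z'
--             case 'C':
--                 if ch == '>':
--                     state = 'D'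
--                 else:
--                     errors.append(f"")
--                     state = 'Z'
--
--     if state == 'D':
--         tokens.append("<>>")
--     else:
--         errors.append("Error: Input did not end in the accepting state")
--
--     return tokens, errors
-- ===== SOURCE B (Python) =====
-- def dfaGreater(input_text):
--     if input_text.startswith("<>>"):
--         return (["<>>"], [])
--     errors = [] if "<>>".startswith(input_text) else [""]
--     errors.append("Error: Input did not end in the accepting state")
--     return ([], errors)
-- ===== Notes on version B (the rewrite author's own statement) =====
-- stated objective: simpler
-- what changed: Replaces the character-by-character state-machine loop (states A/B/C/D/Z with an error accumulator) by two direct prefix tests: accept iff the input starts with the fixed pattern, and emit the single empty-string mismatch error exactly when the input is not itself a prefix of the pattern.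
import Mathlib
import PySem

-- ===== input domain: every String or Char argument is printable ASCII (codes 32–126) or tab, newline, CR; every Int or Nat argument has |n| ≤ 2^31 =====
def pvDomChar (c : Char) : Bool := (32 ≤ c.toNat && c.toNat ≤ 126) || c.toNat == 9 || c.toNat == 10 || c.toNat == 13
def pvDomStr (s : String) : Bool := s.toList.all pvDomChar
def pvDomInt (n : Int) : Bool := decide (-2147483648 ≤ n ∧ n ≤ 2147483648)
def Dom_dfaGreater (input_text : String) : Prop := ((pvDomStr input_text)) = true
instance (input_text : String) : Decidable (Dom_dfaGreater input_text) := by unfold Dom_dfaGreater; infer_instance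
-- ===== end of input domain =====

-- B replaces the five-state DFA loop by two prefix tests ("<>>" prefix of input / input prefix of "<>>"): simpler.

-- ===== PORT A =====
def dfaStep (st : Char × List String) (ch : Char) : Char × List String :=
  if st.1 = 'A' then (if ch = '<' then ('B', st.2) else ('Z', st.2 ++ [""]))
  else if st.1 = 'B' then (if ch = '>' then ('C', st.2) else ('Z', st.2 ++ [""]))
  else if st.1 = 'C' then (if ch = '>' then ('D', st.2) else ('Z', st.2 ++ [""]))
  else st

def dfaGreater (input_text : String) : List String × List String :=
  let r := input_text.toList.foldl dfaStep ('A', [])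
  if r.1 = 'D' then (["<>>"], r.2)
  else (([] : List String), r.2 ++ ["Error: Input did not end in the accepting state"])

-- ===== PORT B =====
def dfaGreater_alt (input_text : String) : List String × List String :=
  if PySem.Str.startswith input_text "<>>" then (["<>>"], ([] : List String))
  else
    let errors : List String :=
      if PySem.Str.startswith "<>>" input_text then [] else [""]
    ([], errors ++ ["Error: Input did not end in the accepting state"])

-- ===== PRECONDITION & SPEC =====
def Spec_dfaGreater (input_text : String) (out : List String × List String) : Prop := out = dfaGreater_alt input_text
instance (input_text : String) (out : List String × List String) : Decidable (Spec_dfaGreater input_text out) := by unfold Spec_dfaGreater; infer_instance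

-- ===== CLAIM (what is proved, stated in full; the proofs are below) =====
def Claim_equal_dfaGreater : Prop := ∀ (input_text : String), Dom_dfaGreater input_text → Spec_dfaGreater input_text (dfaGreater input_text)

-- ===== LEMMAS AND PROOFS =====

-- once the DFA is in the dead state Z or the accepting state D, further input changes nothing
theorem foldl_dfaStep_absorb (l : List Char) (errs : List String) (s : Char)
    (hs : s = 'D' ∨ s = 'Z') : l.foldl dfaStep (s, errs) = (s, errs) := by
  induction l with
  | nil => rfl
  | cons c l ih =>
      rcases hs with h | h <;> subst h <;> simpa [dfaStep] using ih

theorem dfaGreater_eq (s : String) : dfaGreater s = dfaGreater_alt s := by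
  rcases hl : s.toList with _ | ⟨c₁, l₁⟩
  · simp [dfaGreater, dfaGreater_alt, hl, PySem.Str.startswith, PySem.Chars.startswith]
  rcases l₁ with _ | ⟨c₂, l₂⟩
  · by_cases h1 : c₁ = '<' <;>
      simp [dfaGreater, dfaGreater_alt, hl, h1, dfaStep, PySem.Str.startswith,
        PySem.Chars.startswith, List.isPrefixOf, List.foldl]
  rcases l₂ with _ | ⟨c₃, l₃⟩
  · by_cases h1 : c₁ = '<' <;> by_cases h2 : c₂ = '>' <;>
      simp [dfaGreater, dfaGreater_alt, hl, h1, h2, dfaStep, PySem.Str.startswith,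
        PySem.Chars.startswith, List.isPrefixOf, List.foldl]
  · have hD := foldl_dfaStep_absorb l₃ [] 'D' (Or.inl rfl)
    have hZ : ∀ e, List.foldl dfaStep ('Z', e) l₃ = ('Z', e) :=
      fun e => foldl_dfaStep_absorb l₃ e 'Z' (Or.inr rfl)
    by_cases h1 : c₁ = '<' <;> by_cases h2 : c₂ = '>' <;> by_cases h3 : c₃ = '>' <;>
      simp [dfaGreater, dfaGreater_alt, hl, h1, h2, h3, dfaStep, PySem.Str.startswith,
        PySem.Chars.startswith, List.isPrefixOf, List.foldl, hD, hZ] <;>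
      (try (intros; subst_vars; first | simp_all | exact fun h => absurd h.symm (by assumption)))

-- ===== VERDICT (by name: the statement is the Claim_ definition above) =====
theorem dfaGreater_spec : Claim_equal_dfaGreater := by
  intro s _
  exact dfaGreater_eq s
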